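-- pv_equiv track=rewrite | github.com/olakrajna/KeystrokeBiometricSystem | keystroke_dynamics/literowki.py | mismatched_letters
-- ===== SOURCE A (Python) =====
-- def mismatched_letters(mismatched_words):
--     for reference_word, user_word in mismatched_words:
--         letter_diff = []
--
--         # Porównaj litera po literze i identyfikuj różnice
--         for i in range(min(len(reference_word), len(user_word))):
--             if reference_word[i] != user_word[i]:
--                 letter_diff.append((reference_word[i], user_word[i]))
--
--         # Jeśli jedno słowo jest dłuższe, zidentyfikuj dodatkowe litery
--         if len(reference_word) > len(user_word):
--             additional_letters = reference_word[len(user_word):]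
--             letter_diff.extend([(letter, '') for letter in additional_letters])
--
--         elif len(user_word) > len(reference_word):
--             missing_letters = user_word[len(reference_word):]
--             letter_diff.extend([('', letter) for letter in missing_letters])
--
--         return letter_diff
-- ===== SOURCE B (Python) =====
-- from itertools import zip_longest
--
--
-- def mismatched_letters(mismatched_words):
--     for reference_word, user_word in mismatched_words:
--         return [(a, b)
--                 for a, b in zip_longest(reference_word, user_word, fillvalue='')
--                 if a != b]
-- ===== Notes on version B (the rewrite author's own statement) =====
-- stated objective: idiomatic
-- what changed: A's three-segment structure (index loop over the common prefix plus two length-comparison tail branches with slices) is replaced by one pass over itertools.zip_longest with fillvalue '' filtered by a comprehension.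
-- outside the precondition, e.g. on mismatched_letters([]): A returns None, B returns None
import Mathlib
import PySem

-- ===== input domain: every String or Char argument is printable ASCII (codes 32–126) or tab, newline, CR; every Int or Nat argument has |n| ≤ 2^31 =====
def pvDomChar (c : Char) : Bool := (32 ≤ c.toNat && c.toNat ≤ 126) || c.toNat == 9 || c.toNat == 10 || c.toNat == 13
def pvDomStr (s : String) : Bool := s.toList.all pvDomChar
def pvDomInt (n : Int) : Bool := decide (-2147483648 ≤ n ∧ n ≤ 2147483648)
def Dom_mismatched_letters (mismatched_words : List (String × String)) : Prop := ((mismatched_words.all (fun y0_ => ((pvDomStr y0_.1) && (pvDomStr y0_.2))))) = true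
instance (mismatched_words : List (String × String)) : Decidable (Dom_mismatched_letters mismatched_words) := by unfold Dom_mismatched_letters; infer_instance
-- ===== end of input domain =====

-- B replaces A's prefix-index loop plus two length-comparison tail branches by one
-- filtered pass over zip_longest(…, fillvalue='') (objective: idiomatic).

-- ===== PORT A =====
-- loop 'for i in range(min(len(r), len(u))): if r[i] != u[i]: letter_diff.append(...)';
-- getD's default is never used: i < min of both lengths.
def mlLoopA (rc uc : List Char) : List (String × String) :=
  (List.range (Nat.min rc.length uc.length)).foldl
    (fun acc i =>
      if rc.getD i ' ' ≠ uc.getD i ' ' then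
        acc ++ [((rc.getD i ' ').toString, (uc.getD i ' ').toString)]
      else acc) []

-- the two tail branches: r[len(u):] / u[len(r):]  (PySem.List.slice with nonneg bound = drop)
def mlBodyA (rc uc : List Char) : List (String × String) :=
  let letter_diff := mlLoopA rc uc
  if rc.length > uc.length then
    letter_diff ++ (PySem.List.slice rc (some (uc.length : Int)) none).map (fun c => (c.toString, ""))
  else if uc.length > rc.length then
    letter_diff ++ (PySem.List.slice uc (some (rc.length : Int)) none).map (fun c => ("", c.toString))
  else letter_diff

def mismatched_letters (mismatched_words : List (String × String)) : List (String × String) :=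
  -- 'for …: return …' — only the first pair is processed; [] is excluded by Pre_ (A returns None)
  match mismatched_words with
  | [] => []
  | (reference_word, user_word) :: _ => mlBodyA reference_word.toList user_word.toList

-- ===== PORT B =====
-- zip_longest(rc, uc, fillvalue='')
def zipLongestB : List Char → List Char → List (String × String)
  | a :: as, b :: bs => (a.toString, b.toString) :: zipLongestB as bs
  | a :: as, [] => (a.toString, "") :: zipLongestB as []
  | [], b :: bs => ("", b.toString) :: zipLongestB [] bs
  | [], [] => []

def mismatched_letters_alt (mismatched_words : List (String × String)) : List (String × String) :=
  match mismatched_words with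
  | [] => []
  | (reference_word, user_word) :: _ =>
    (zipLongestB reference_word.toList user_word.toList).filter (fun p => p.1 ≠ p.2)

-- ===== PRECONDITION & SPEC =====
-- Pre_ excludes the empty list, on which A returns None instead of a list.
def Pre_mismatched_letters (mismatched_words : List (String × String)) : Prop :=
  mismatched_words ≠ []
instance (mismatched_words : List (String × String)) : Decidable (Pre_mismatched_letters mismatched_words) := by unfold Pre_mismatched_letters; infer_instance

def pvWitness_mismatched_letters : (List (String × String)) := [("abc", "axcde")]

def Spec_mismatched_letters (mismatched_words : List (String × String)) (out : List (String × String)) : Prop := out = mismatched_letters_alt mismatched_words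
instance (mismatched_words : List (String × String)) (out : List (String × String)) : Decidable (Spec_mismatched_letters mismatched_words out) := by unfold Spec_mismatched_letters; infer_instance

-- ===== CLAIM (what is proved, stated in full; the proofs are below) =====
def Claim_equal_mismatched_letters : Prop := ∀ (mismatched_words : List (String × String)), Dom_mismatched_letters mismatched_words → Pre_mismatched_letters mismatched_words → Spec_mismatched_letters mismatched_words (mismatched_letters mismatched_words)

-- ===== LEMMAS AND PROOFS =====

theorem zipLongestB_nil_right (rc : List Char) :
    zipLongestB rc [] = rc.map (fun c => (c.toString, "")) := by
  induction rc with
  | nil => simp [zipLongestB]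
  | cons a as ih => simp [zipLongestB, ih]

theorem zipLongestB_nil_left (uc : List Char) :
    zipLongestB [] uc = uc.map (fun c => ("", c.toString)) := by
  induction uc with
  | nil => simp [zipLongestB]
  | cons b bs ih => simp [zipLongestB, ih]

theorem mlLoopA_cons (a b : Char) (as bs : List Char) :
    mlLoopA (a :: as) (b :: bs) =
      (if a ≠ b then [(a.toString, b.toString)] else []) ++ mlLoopA as bs := by
  unfold mlLoopA
  rw [PySem.List.foldl_append_ite, PySem.List.foldl_append_ite]
  simp only [List.length_cons, Nat.min_def]
  have hmin : (if as.length + 1 ≤ bs.length + 1 then as.length + 1 else bs.length + 1)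
      = (if as.length ≤ bs.length then as.length else bs.length) + 1 := by
    split_ifs with h1 h2 h2 <;> omega
  rw [hmin, List.range_succ_eq_map]
  simp only [List.filter_cons, List.filter_map]
  have hget : ∀ (i : Nat), (a :: as).getD (Nat.succ i) ' ' = as.getD i ' ' := fun _ => rfl
  by_cases hab : a = b
  · subst hab
    simp only [List.getD_cons_zero, ne_eq, not_true_eq_false, decide_false]
    simp [Function.comp_def, List.getD]
    congr 1
  · simp only [List.getD_cons_zero, ne_eq, hab, not_false_eq_true, decide_true]
    simp [Function.comp_def, List.getD]
    congr 1

theorem mlBodyA_eq (rc uc : List Char) :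
    mlBodyA rc uc = (zipLongestB rc uc).filter (fun p => p.1 ≠ p.2) := by
  induction rc generalizing uc with
  | nil =>
    cases uc with
    | nil => simp [mlBodyA, mlLoopA, zipLongestB]
    | cons b bs =>
      unfold mlBodyA mlLoopA
      simp only [List.length_nil, List.length_cons, Nat.min_def]
      rw [zipLongestB_nil_left]
      rw [PySem.List.slice_from_natCast]
      simp [List.filter_map, Function.comp_def]
  | cons a as ih =>
    cases uc with
    | nil =>
      unfold mlBodyA mlLoopA
      simp only [List.length_nil, List.length_cons, Nat.min_def]
      rw [zipLongestB_nil_right]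
      rw [PySem.List.slice_from_natCast]
      simp [List.filter_map, Function.comp_def]
    | cons b bs =>
      have hstep : mlBodyA (a :: as) (b :: bs) =
          (if a ≠ b then [(a.toString, b.toString)] else []) ++ mlBodyA as bs := by
        unfold mlBodyA
        rw [mlLoopA_cons]
        simp only [List.length_cons]
        rw [PySem.List.slice_from_natCast, PySem.List.slice_from_natCast]
        have h1 : (a :: as).drop (bs.length + 1) = as.drop bs.length := rfl
        have h2 : (b :: bs).drop (as.length + 1) = bs.drop as.length := rfl
        rw [h1, h2]
        split_ifs with hgt hlt <;> simp_all
      rw [hstep, ih]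
      simp only [zipLongestB, List.filter_cons]
      by_cases hab : a = b
      · subst hab
        simp
      · have hne : String.singleton a ≠ String.singleton b := fun h =>
          hab (by simpa [String.singleton] using congrArg String.toList h)
        simp [hab, Char.toString, hne]

-- ===== VERDICT (by name: the statement is the Claim_ definition above) =====
theorem mismatched_letters_spec : Claim_equal_mismatched_letters := by
  intro l _hdom hpre
  unfold Spec_mismatched_letters
  match l with
  | [] => exact absurd rfl hpre
  | (r, u) :: _ =>
    simp only [mismatched_letters, mismatched_letters_alt]
    exact mlBodyA_eq r.toList u.toList
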